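-- pv_equiv track=rewrite | github.com/Callaghan-Hattingh/trading-bot-4 | src/calcu/calcu.py | cal_buys
-- ===== SOURCE A (Python) =====
-- def cal_buys(price: int) -> list[int]:
--     l = []
--     v = price - price % 5000
--     for i in enumerate(range(v, 0, -5000)):
--         if i[0] > 9:
--             break
--         l.append(i[1])
--     return l
-- ===== SOURCE B (Python) =====
-- def cal_buys(price: int) -> list[int]:
--     v = price - price % 5000
--     def climb(x):
--         if x > v:
--             return []
--         return climb(x + 5000) + [x]
--     return climb(max(5000, v - 45000))
-- ===== Notes on version B (the rewrite author's own statement) =====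
-- stated objective: alternative
-- what changed: B first computes the lower endpoint max(5000, v-45000) arithmetically, then builds the descending output back-to-front by structural recursion climbing upward from that endpoint, instead of A's forward loop over enumerate(range(v,0,-5000)) with a break at index 10.
import Mathlib
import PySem

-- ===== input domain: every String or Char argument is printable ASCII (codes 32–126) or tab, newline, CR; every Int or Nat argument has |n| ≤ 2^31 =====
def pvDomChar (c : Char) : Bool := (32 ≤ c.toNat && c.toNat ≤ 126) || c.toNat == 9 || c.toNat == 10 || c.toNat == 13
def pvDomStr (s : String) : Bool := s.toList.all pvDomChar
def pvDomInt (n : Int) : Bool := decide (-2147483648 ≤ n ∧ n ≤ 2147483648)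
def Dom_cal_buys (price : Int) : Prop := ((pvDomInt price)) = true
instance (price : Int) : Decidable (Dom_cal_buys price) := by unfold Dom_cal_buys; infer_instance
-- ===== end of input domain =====

-- B computes the lower endpoint arithmetically and builds the descending list back-to-front by
-- recursion climbing upward from it, instead of A's enumerate-and-break loop (objective: alternative).

-- ===== PORT A =====
-- A's for-loop over enumerate(range(v, 0, -5000)) with its break at index > 9;
-- enumerate is Python's lazy counter, ported as the index argument carried through the loop
def calAloop : List Int → Int → List Int → List Int
  | [], _, l => l
  | x :: rest, idx, l => if idx > 9 then l else calAloop rest (idx + 1) (l ++ [x])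

def cal_buys (price : Int) : List Int :=
  let v := price - PySem.Int.mod price 5000
  calAloop (PySem.List.pyRange v 0 (-5000)) 0 []

-- ===== PORT B =====
-- climb v x returns [v, v-5000, …, x] (descending), built back-to-front as in Source B's recursion
def climb (v x : Int) : List Int :=
  if x > v then [] else climb v (x + 5000) ++ [x]
termination_by (v + 1 - x).toNat
decreasing_by omega

def cal_buys_alt (price : Int) : List Int :=
  let v := price - PySem.Int.mod price 5000
  climb v (max 5000 (v - 45000))

-- ===== PRECONDITION & SPEC =====
def Spec_cal_buys (price : Int) (out : List Int) : Prop := out = cal_buys_alt price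
instance (price : Int) (out : List Int) : Decidable (Spec_cal_buys price out) := by unfold Spec_cal_buys; infer_instance

-- ===== CLAIM (what is proved, stated in full; the proofs are below) =====
def Claim_equal_cal_buys : Prop := ∀ (price : Int), Dom_cal_buys price → Spec_cal_buys price (cal_buys price)

-- ===== LEMMAS AND PROOFS =====

-- A's loop appends exactly the elements whose index is ≤ 9: it takes the first 10 - s elements.
theorem calAloop_enumerate (xs : List Int) : ∀ (s : Int) (acc : List Int), 0 ≤ s →
    calAloop xs s acc = acc ++ xs.take (10 - s.toNat) := by
  induction xs with
  | nil => intro s acc _; simp [calAloop]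
  | cons x xs ih =>
    intro s acc hs
    simp only [calAloop]
    split_ifs with h
    · have h0 : 10 - s.toNat = 0 := by omega
      simp [h0]
    · rw [ih (s + 1) (acc ++ [x]) (by omega)]
      have h1 : 10 - s.toNat = (10 - (s + 1).toNat) + 1 := by omega
      rw [h1, List.take_succ_cons, List.append_assoc]
      rfl

-- B's climb, characterised: when x is k steps of 5000 below v, it yields the descending map.
theorem climb_eq (k : Nat) : ∀ (v x : Int), v - x = 5000 * k →
    climb v x = (List.range (k + 1)).map (fun i : Nat => v - 5000 * (i : Int)) := by
  induction k with
  | zero =>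
    intro v x h
    have hx : x = v := by omega
    rw [climb, if_neg (by omega), climb, if_pos (by omega)]
    simp [hx]
  | succ k ih =>
    intro v x h
    rw [climb, if_neg (by push_cast at h; omega)]
    rw [ih v (x + 5000) (by push_cast at h ⊢; omega)]
    rw [List.range_succ (n := k + 1), List.map_append]
    congr 1
    simp only [List.map_cons, List.map_nil]
    congr 1
    push_cast at h ⊢
    omega

-- ===== VERDICT (by name: the statement is the Claim_ definition above) =====
theorem cal_buys_spec : Claim_equal_cal_buys := by
  intro price _
  unfold Spec_cal_buys cal_buys cal_buys_alt
  set v := price - PySem.Int.mod price 5000 with hv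
  obtain ⟨m, hq⟩ : (5000:Int) ∣ v := by
    refine ⟨price.fdiv 5000, ?_⟩
    have h1 := Int.fmod_add_mul_fdiv price 5000
    simp only [hv, PySem.Int.mod]; omega
  rw [calAloop_enumerate _ 0 [] le_rfl]
  simp only [List.nil_append, Int.toNat_zero, Nat.sub_zero]
  simp only [PySem.List.pyRange]
  norm_num
  rw [← List.map_take, List.take_range]
  by_cases hpos : 0 < v
  · have hm1 : 1 ≤ m := by omega
    have hk : v - max 5000 (v - 45000) = 5000 * ((min (m - 1) 9).toNat : Int) := by omega
    rw [climb_eq (min (m - 1) 9).toNat v _ hk]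
    have hcnt : (if 0 < v then ((v + 5000 - 1) / 5000).toNat else 0) = m.toNat := by
      rw [if_pos hpos]; omega
    have hn : min 10 (if 0 < v then ((v + 5000 - 1) / 5000).toNat else 0)
        = (min (m - 1) 9).toNat + 1 := by rw [hcnt]; omega
    rw [hn]
    apply List.map_congr_left
    intro k _
    ring
  · have hn : min 10 (if 0 < v then ((v + 5000 - 1) / 5000).toNat else 0) = 0 := by
      rw [if_neg hpos]; omega
    rw [hn, climb, if_pos (by omega)]
    simp
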